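-- pv_equiv track=rewrite | github.com/Pjoterro/adventofocde | 2015/day15.py | eval_recipe
-- ===== SOURCE A (Python) =====
-- def eval_recipe(recipe, ingridients):  # [name, cap, dur, flav, text, cal]
--     capacity = 0
--     durability = 0
--     flavor = 0
--     texture = 0
--     i = 0
--     while i < len(recipe):
--         capacity += recipe[i] * ingridients[i][1]
--         durability += recipe[i] * ingridients[i][2]
--         flavor += recipe[i] * ingridients[i][3]
--         texture += recipe[i] * ingridients[i][4]
--         i += 1
--     if capacity < 0:
--         capacity = 0
--     if durability < 0:
--         durability = 0
--     if flavor < 0: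
--         flavor = 0
--     if texture < 0:
--         texture = 0
--     result = capacity * durability * flavor * texture
--     return result
-- ===== SOURCE B (Python) =====
-- def eval_recipe(recipe, ingridients):  # [name, cap, dur, flav, text, cal]
--     def vec(lo, hi):
--         # 4-vector of property totals over rows lo..hi-1, by divide and conquer
--         if hi - lo == 0:
--             return (0, 0, 0, 0)
--         if hi - lo == 1:
--             amt = recipe[lo]
--             row = ingridients[lo]
--             return (amt * row[1], amt * row[2], amt * row[3], amt * row[4])
--         mid = (lo + hi) // 2
--         left = vec(lo, mid)
--         right = vec(mid, hi)
--         return (left[0] + right[0], left[1] + right[1],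
--                 left[2] + right[2], left[3] + right[3])
--     score = 1
--     for t in vec(0, len(recipe)):
--         score *= max(t, 0)
--     return score
-- ===== Notes on version B (the rewrite author's own statement) =====
-- stated objective: alternative
-- what changed: Replaced the linear index loop with four scalar accumulators by a divide-and-conquer recursion that splits the row range in half, combines the two halves' 4-vectors of property totals by vector addition, and clamps and multiplies only at the top.
import Mathlib
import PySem

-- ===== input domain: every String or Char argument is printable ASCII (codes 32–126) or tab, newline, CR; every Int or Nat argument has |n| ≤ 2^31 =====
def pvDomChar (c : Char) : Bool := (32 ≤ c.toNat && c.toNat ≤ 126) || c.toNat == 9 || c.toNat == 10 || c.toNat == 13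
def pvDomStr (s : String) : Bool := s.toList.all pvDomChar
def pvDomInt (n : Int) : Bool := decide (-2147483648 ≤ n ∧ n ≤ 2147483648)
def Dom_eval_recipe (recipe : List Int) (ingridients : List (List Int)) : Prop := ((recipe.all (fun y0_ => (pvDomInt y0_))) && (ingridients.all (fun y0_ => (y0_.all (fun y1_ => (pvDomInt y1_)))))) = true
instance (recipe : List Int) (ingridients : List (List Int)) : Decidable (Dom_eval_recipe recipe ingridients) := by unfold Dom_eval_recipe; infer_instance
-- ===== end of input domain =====

-- B replaces the linear index loop with four accumulators by a divide-and-conquer recursion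
-- over the row range that combines half-range 4-vectors of totals (objective: alternative).

-- ===== PORT A =====
-- while loop over i with four accumulators, then clamp each, then multiply.
def eval_recipe (recipe : List Int) (ingridients : List (List Int)) : Int :=
  let st := (PySem.List.pyRange 0 recipe.length 1).foldl
    (fun (acc : Int × Int × Int × Int) i =>
      let r := PySem.List.pyGetD recipe i 0
      let row := PySem.List.pyGetD ingridients i []
      (acc.1 + r * PySem.List.pyGetD row 1 0,
       acc.2.1 + r * PySem.List.pyGetD row 2 0,
       acc.2.2.1 + r * PySem.List.pyGetD row 3 0,
       acc.2.2.2 + r * PySem.List.pyGetD row 4 0)) (0, 0, 0, 0)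
  let capacity := if st.1 < 0 then 0 else st.1
  let durability := if st.2.1 < 0 then 0 else st.2.1
  let flavor := if st.2.2.1 < 0 then 0 else st.2.2.1
  let texture := if st.2.2.2 < 0 then 0 else st.2.2.2
  capacity * durability * flavor * texture

-- ===== PORT B =====
-- vec(lo, hi): 4-vector of property totals over rows lo..hi-1, by divide and conquer.
-- Python's lo/hi are always nonnegative here, so they are carried as Nat (Nat (lo+hi)/2
-- is Python's (lo+hi)//2 on these values); list indexing still uses the Int primitive.
def vecB (recipe : List Int) (ingridients : List (List Int)) (lo hi : Nat) : Int × Int × Int × Int :=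
  if hi - lo = 0 then (0, 0, 0, 0)
  else if hi - lo = 1 then
    -- amt = recipe[lo]; row = ingridients[lo] (locals inlined)
    (PySem.List.pyGetD recipe (lo : Int) 0 * PySem.List.pyGetD (PySem.List.pyGetD ingridients (lo : Int) []) 1 0,
     PySem.List.pyGetD recipe (lo : Int) 0 * PySem.List.pyGetD (PySem.List.pyGetD ingridients (lo : Int) []) 2 0,
     PySem.List.pyGetD recipe (lo : Int) 0 * PySem.List.pyGetD (PySem.List.pyGetD ingridients (lo : Int) []) 3 0,
     PySem.List.pyGetD recipe (lo : Int) 0 * PySem.List.pyGetD (PySem.List.pyGetD ingridients (lo : Int) []) 4 0)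
  else
    -- mid = (lo+hi)//2 (local inlined)
    let left := vecB recipe ingridients lo ((lo + hi) / 2)
    let right := vecB recipe ingridients ((lo + hi) / 2) hi
    (left.1 + right.1, left.2.1 + right.2.1,
     left.2.2.1 + right.2.2.1, left.2.2.2 + right.2.2.2)
termination_by hi - lo
decreasing_by all_goals omega

-- score = 1; for t in vec(0, len(recipe)): score *= max(t, 0)
def eval_recipe_alt (recipe : List Int) (ingridients : List (List Int)) : Int :=
  let t := vecB recipe ingridients 0 recipe.length
  [t.1, t.2.1, t.2.2.1, t.2.2.2].foldl (fun score x => score * max x 0) 1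

-- ===== PRECONDITION & SPEC =====
-- Pre_ excludes exactly the inputs where Python A raises IndexError: a recipe longer than the
-- ingredient list, or an ingredient row among the first len(recipe) with fewer than 5 entries.
def Pre_eval_recipe (recipe : List Int) (ingridients : List (List Int)) : Prop :=
  recipe.length ≤ ingridients.length ∧
  ∀ row ∈ ingridients.take recipe.length, 5 ≤ row.length
instance (recipe : List Int) (ingridients : List (List Int)) : Decidable (Pre_eval_recipe recipe ingridients) := by unfold Pre_eval_recipe; infer_instance

def pvWitness_eval_recipe : List Int × List (List Int) :=
  ([2, 3], [[0, 1, -2, 3, 4, 5], [0, -1, 2, 3, 1, 8]])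

def Spec_eval_recipe (recipe : List Int) (ingridients : List (List Int)) (out : Int) : Prop := out = eval_recipe_alt recipe ingridients
instance (recipe : List Int) (ingridients : List (List Int)) (out : Int) : Decidable (Spec_eval_recipe recipe ingridients out) := by unfold Spec_eval_recipe; infer_instance

-- ===== CLAIM (what is proved, stated in full; the proofs are below) =====
def Claim_equal_eval_recipe : Prop := ∀ (recipe : List Int) (ingridients : List (List Int)), Dom_eval_recipe recipe ingridients → Pre_eval_recipe recipe ingridients → Spec_eval_recipe recipe ingridients (eval_recipe recipe ingridients)

-- ===== LEMMAS AND PROOFS =====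

-- column total of property p over rows lo..hi-1 (characterises both programs' sums)
def colT (recipe : List Int) (ingridients : List (List Int)) (p : Int) (lo hi : Nat) : Int :=
  ((PySem.List.pyRange (lo : Int) (hi : Int) 1).map
    (fun i => PySem.List.pyGetD recipe i 0 *
              PySem.List.pyGetD (PySem.List.pyGetD ingridients i []) p 0)).sum

-- A's four-accumulator fold is the quadruple of four single-accumulator folds.
theorem foldl_quad (l : List Int) (g1 g2 g3 g4 : Int → Int) (a b c d : Int) :
    l.foldl (fun (acc : Int × Int × Int × Int) i =>
        (acc.1 + g1 i, acc.2.1 + g2 i, acc.2.2.1 + g3 i, acc.2.2.2 + g4 i)) (a, b, c, d)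
      = (l.foldl (fun s i => s + g1 i) a, l.foldl (fun s i => s + g2 i) b,
         l.foldl (fun s i => s + g3 i) c, l.foldl (fun s i => s + g4 i) d) := by
  induction l generalizing a b c d with
  | nil => rfl
  | cons x xs ih => simp [List.foldl, ih]

theorem foldl_sum (l : List Int) (f : Int → Int) (a : Int) :
    l.foldl (fun s i => s + f i) a = a + (l.map f).sum := by
  induction l generalizing a with
  | nil => simp
  | cons x xs ih => simp [List.foldl, ih]; ring

theorem clamp_eq_max (x : Int) : (if x < 0 then 0 else x) = max x 0 := by
  rcases lt_or_ge x 0 with h | h <;> simp [h, le_of_lt]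

-- the divide-and-conquer vector equals the quadruple of column totals
theorem vecB_eq_colT (recipe : List Int) (ingridients : List (List Int)) (lo hi : Nat) :
    vecB recipe ingridients lo hi
      = (colT recipe ingridients 1 lo hi, colT recipe ingridients 2 lo hi,
         colT recipe ingridients 3 lo hi, colT recipe ingridients 4 lo hi) := by
  fun_induction vecB recipe ingridients lo hi with
  | case1 lo hi h0 =>
      have : PySem.List.pyRange (lo : Int) (hi : Int) 1 = [] :=
        PySem.List.pyRange_one_eq_nil (by omega)
      simp [colT, this]
  | case2 lo hi h0 h1 =>
      have hhi : hi = lo + 1 := by omega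
      subst hhi
      simp [colT]
  | case3 lo hi h0 h1 l r ihL ihR =>
      have hsplit : ∀ p : Int, colT recipe ingridients p lo hi
          = colT recipe ingridients p lo ((lo + hi) / 2)
            + colT recipe ingridients p ((lo + hi) / 2) hi := by
        intro p
        unfold colT
        rw [PySem.List.pyRange_one_append (lo : Int) (((lo + hi) / 2 : Nat) : Int) (hi : Int)
              (by exact_mod_cast Nat.le_div_iff_mul_le (by omega) |>.mpr (by omega))
              (by exact_mod_cast Nat.div_le_of_le_mul (by omega))]
        simp
      simp only [l, r, ihL, ihR, hsplit]

-- ===== VERDICT (by name: the statement is the Claim_ definition above) =====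
theorem eval_recipe_spec : Claim_equal_eval_recipe := by
  intro recipe ingridients _ _
  show eval_recipe recipe ingridients = eval_recipe_alt recipe ingridients
  unfold eval_recipe eval_recipe_alt
  rw [foldl_quad, vecB_eq_colT]
  simp only [foldl_sum, zero_add, colT, Nat.cast_zero, List.foldl, clamp_eq_max]
  ring
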